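-- pv_equiv track=rewrite | github.com/emarberg/schurp | tests/test_keys.py | morse_schilling_f
-- ===== SOURCE A (Python) =====
-- def morse_schilling_f(decreasing_factorization, bounded=True):
--     for i in range(len(decreasing_factorization)):
--         if i == len(decreasing_factorization) - 1:
--             decreasing_factorization += ((),)
--
--         a = decreasing_factorization[i]
--         b = decreasing_factorization[i + 1]
--         unpaired = []
--
--         while a:
--             paired = False
--             for j in range(len(b) - 1, -1, -1):
--                 if b[j] > a[0]:
--                     b = b[:j] + b[j + 1:]
--                     paired = True
--                     break
--             if not paired:
--                 unpaired += [a[0]]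
--             a = a[1:]
--
--         if len(unpaired) == 0:
--             continue
--
--         x = unpaired[-1]
--         y = x
--         while y in decreasing_factorization[i + 1]:
--             y -= 1
--         df = list(decreasing_factorization)
--         df[i] = tuple(e for e in df[i] if e != x)
--         df[i + 1] = tuple(sorted(df[i + 1] + (y,), reverse=True))
--
--         while df and df[-1] == ():
--             df = df[:-1]
--
--         if not bounded or all(df[i][-1] > i for i in range(len(df)) if df[i]):
--             yield i, tuple(df)
-- ===== SOURCE B (Python) =====
-- # B: same crystal f-operator, computed by the dual bracket matching: instead of
-- # A's per-element right-to-left index scan over (and repeated rebuilding of) the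
-- # neighbour factor, B folds once over that factor from the right, each element
-- # knocking out the earliest still-unpaired smaller element of the current
-- # factor; y is found via a set, and the new factor sorted ascending then
-- # reversed.  Same worst-case cost; a different traversal (objective:
-- # alternative).
-- # NOTE: A extends its (list) argument in place with an empty tuple; B does not
-- # mutate its argument (the equivalence is about the yielded values only).
--
-- def morse_schilling_f(decreasing_factorization, bounded=True):
--     fac = [tuple(f) for f in decreasing_factorization]
--     n = len(fac)
--     for i in range(n):
--         a = fac[i]
--         b = fac[i + 1] if i + 1 < n else ()
--         # dual bracket matching: scanning b right-to-left, each y pairs the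
--         # earliest still-unpaired element of a that is smaller than y;
--         # what survives is exactly A's unpaired list
--         u = list(a)
--         for y in reversed(b):
--             for j, e in enumerate(u):
--                 if e < y:
--                     del u[j]
--                     break
--         if not u:
--             continue
--         x = u[-1]
--         s = set(b)
--         y = x
--         while y in s:
--             y -= 1
--         df = list(fac)
--         df[i] = tuple(e for e in df[i] if e != x)
--         df[i + 1:i + 2] = [tuple(sorted(b + (y,))[::-1])]
--         last = len(df)
--         while last > 0 and df[last - 1] == ():
--             last -= 1
--         df = df[:last]
--         if not bounded or all(f[-1] > j for j, f in enumerate(df) if f):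
--             yield i, tuple(df)
-- ===== Notes on version B (the rewrite author's own statement) =====
-- stated objective: alternative
-- what changed: Computes the bracket matching dually: instead of A's per-element right-to-left index scan over (and repeated rebuilding of) the neighbour factor, B folds once over that factor from the right, each element knocking out the earliest still-unpaired smaller element of the current factor; y is found via a set instead of repeated list membership, and the new factor is sorted ascending then reversed instead of sorted(reverse=True).
import Mathlib
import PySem

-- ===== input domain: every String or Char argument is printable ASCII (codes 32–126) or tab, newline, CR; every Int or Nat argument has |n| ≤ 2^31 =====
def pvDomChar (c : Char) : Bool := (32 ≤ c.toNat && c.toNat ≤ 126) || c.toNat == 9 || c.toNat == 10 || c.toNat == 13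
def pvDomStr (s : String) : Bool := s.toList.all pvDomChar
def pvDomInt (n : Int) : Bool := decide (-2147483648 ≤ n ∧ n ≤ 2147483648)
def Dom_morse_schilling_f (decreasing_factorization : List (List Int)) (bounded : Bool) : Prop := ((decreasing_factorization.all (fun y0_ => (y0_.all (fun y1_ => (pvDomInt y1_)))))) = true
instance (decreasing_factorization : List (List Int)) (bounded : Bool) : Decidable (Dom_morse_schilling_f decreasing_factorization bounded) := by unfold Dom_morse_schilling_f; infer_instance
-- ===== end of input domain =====

-- B computes the bracket matching dually: one fold over the neighbour factor
-- from the right, each element knocking out the earliest still-unpaired smaller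
-- element of the current factor, in place of A's per-element right-to-left
-- index scan over (and repeated rebuilding of) the neighbour factor.
-- Side-effect note: Python A extends its (list) argument in place with an empty
-- tuple; B does not mutate its argument. The equivalence is about the yielded
-- values only.

-- ===== PORT A =====
-- inner 'for j in range(len(b)-1, -1, -1): if b[j] > a[0]: b = b[:j]+b[j+1:]; break'
def aFind (b : List Int) (a0 : Int) : Nat → Option (List Int)
  | 0 => none
  | j + 1 => if a0 < b.getD j 0 then some (b.take j ++ b.drop (j + 1)) else aFind b a0 j

-- 'while a: … if not paired: unpaired += [a[0]]; a = a[1:]'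
def aPairLoop : List Int → List Int → List Int → List Int × List Int
  | [], b, u => (u, b)
  | a0 :: rest, b, u =>
    match aFind b a0 b.length with
    | some b' => aPairLoop rest b' u
    | none => aPairLoop rest b (u ++ [a0])

-- 'y = x; while y in decreasing_factorization[i+1]: y -= 1' (fuel |b|+1 suffices:
-- each decrement consumes a distinct member of b)
def aYLoop (b : List Int) : Int → Nat → Int
  | y, 0 => y
  | y, f + 1 => if y ∈ b then aYLoop b (y - 1) f else y

-- 'while df and df[-1] == (): df = df[:-1]'
def aStrip (df : List (List Int)) : List (List Int) :=
  if df.getLast? = some ([] : List Int) then aStrip df.dropLast else df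
termination_by df.length
decreasing_by
  rename_i h
  have hne : df ≠ [] := by rintro rfl; simp at h
  have := List.length_pos_of_ne_nil hne
  rw [List.length_dropLast]; omega

-- 'all(df[i][-1] > i for i in range(len(df)) if df[i])'
def aBoundedChk (df : List (List Int)) : Bool :=
  (List.range df.length).all fun k =>
    if (df.getD k []) ≠ [] then decide ((k : Int) < (df.getD k []).getLastD 0) else true

-- 'for i in range(len(decreasing_factorization)): …' (fuel = remaining iterations)
def aLoop (bounded : Bool) : List (List Int) → Nat → Nat → List (Int × List (List Int))
  | _, _, 0 => []
  | fac, i, fuel + 1 =>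
    let fac' := if i + 1 = fac.length then fac ++ [([] : List Int)] else fac
    let a := fac'.getD i []
    let b := fac'.getD (i + 1) []
    let unpaired := (aPairLoop a b []).1
    if unpaired = [] then aLoop bounded fac' (i + 1) fuel
    else
      let x := PySem.List.pyGetD unpaired (-1) 0
      let y := aYLoop (fac'.getD (i + 1) []) x ((fac'.getD (i + 1) []).length + 1)
      let df := fac'.set i ((fac'.getD i []).filter (fun e => decide (e ≠ x)))
      let df := df.set (i + 1) (PySem.List.sorted (df.getD (i + 1) [] ++ [y]) (fun e => e) true)
      let df := aStrip df
      let rest := aLoop bounded fac' (i + 1) fuel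
      if !bounded || aBoundedChk df then ((i : Int), df) :: rest else rest

def morse_schilling_f (decreasing_factorization : List (List Int)) (bounded : Bool) : List (Int × List (List Int)) :=
  aLoop bounded decreasing_factorization 0 decreasing_factorization.length

-- ===== PORT B =====
-- 'for j, e in enumerate(u): if e < y: del u[j]; break'
def bRem : List Int → Int → List Int
  | [], _ => []
  | e :: u, y => if e < y then u else e :: bRem u y

-- 'u = list(a); for y in reversed(b): <knock out first element of u below y>'
def bDual (a b : List Int) : List Int :=
  b.reverse.foldl (fun u y => bRem u y) a

-- 'y = x; while y in s: y -= 1' (fuel |b|+1 suffices, as in A's port)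
def bYLoop (s : List Int) : Int → Nat → Int
  | y, 0 => y
  | y, f + 1 => if y ∈ s then bYLoop s (y - 1) f else y

-- 'tuple(sorted(b + (y,))[::-1])'
def bSortDesc (l : List Int) : List Int :=
  (PySem.List.sorted l (fun e => e) false).reverse

-- 'last = len(df); while last > 0 and df[last-1] == (): last -= 1'
def bStripLen (df : List (List Int)) : Nat → Nat
  | 0 => 0
  | k + 1 => if df.getD k [] = [] then bStripLen df k else k + 1

-- 'all(f[-1] > j for j, f in enumerate(df) if f)'
def bBoundedChk (df : List (List Int)) : Bool :=
  (PySem.List.enumerate df 0).all fun jf =>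
    if jf.2 ≠ [] then decide (jf.1 < jf.2.getLastD 0) else true

def bLoop (bounded : Bool) (fac : List (List Int)) (n : Nat) : Nat → Nat → List (Int × List (List Int))
  | _, 0 => []
  | i, fuel + 1 =>
    let a := fac.getD i []
    let b := if i + 1 < n then fac.getD (i + 1) [] else []
    let u := bDual a b
    if u = [] then bLoop bounded fac n (i + 1) fuel
    else
      let x := PySem.List.pyGetD u (-1) 0
      let s := PySem.Set.ofList b
      let y := bYLoop s x (b.length + 1)
      let df := fac.set i (a.filter (fun e => decide (e ≠ x)))
      let df := if i + 1 < n then df.set (i + 1) (bSortDesc (b ++ [y])) else df ++ [bSortDesc (b ++ [y])]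
      let df := df.take (bStripLen df df.length)
      let rest := bLoop bounded fac n (i + 1) fuel
      if !bounded || bBoundedChk df then ((i : Int), df) :: rest else rest

def morse_schilling_f_alt (decreasing_factorization : List (List Int)) (bounded : Bool) : List (Int × List (List Int)) :=
  bLoop bounded decreasing_factorization decreasing_factorization.length 0 decreasing_factorization.length

-- ===== PRECONDITION & SPEC =====
def Spec_morse_schilling_f (decreasing_factorization : List (List Int)) (bounded : Bool) (out : List (Int × List (List Int))) : Prop := out = morse_schilling_f_alt decreasing_factorization bounded
instance (decreasing_factorization : List (List Int)) (bounded : Bool) (out : List (Int × List (List Int))) : Decidable (Spec_morse_schilling_f decreasing_factorization bounded out) := by unfold Spec_morse_schilling_f; infer_instance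

-- ===== CLAIM (what is proved, stated in full; the proofs are below) =====
def Claim_equal_morse_schilling_f : Prop := ∀ (decreasing_factorization : List (List Int)) (bounded : Bool), Dom_morse_schilling_f decreasing_factorization bounded → Spec_morse_schilling_f decreasing_factorization bounded (morse_schilling_f decreasing_factorization bounded)

-- ===== LEMMAS AND PROOFS =====

theorem aFind_none (b : List Int) (a0 : Int) :
    ∀ n, (∀ j, j < n → ¬ (a0 < b.getD j 0)) → aFind b a0 n = none := by
  intro n
  induction n with
  | zero => intro _; rfl
  | succ m ih =>
    intro h
    rw [aFind, if_neg (h m (by omega))]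
    exact ih (fun j hj => h j (by omega))

theorem aFind_some (b : List Int) (a0 : Int) : ∀ n, n ≤ b.length →
    (∃ j, j < n ∧ a0 < b.getD j 0) →
    ∃ j, j < n ∧ a0 < b.getD j 0 ∧ (∀ k, j < k → k < n → ¬ (a0 < b.getD k 0)) ∧
      aFind b a0 n = some (b.take j ++ b.drop (j + 1)) := by
  intro n
  induction n with
  | zero => intro _ ⟨j, hj, _⟩; omega
  | succ m ih =>
    intro hle ⟨j, hj, hgt⟩
    by_cases hm : a0 < b.getD m 0
    · exact ⟨m, by omega, hm, by intro k h1 h2; omega, by rw [aFind, if_pos hm]⟩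
    · have hjm : j < m := by
        rcases Nat.lt_succ_iff_lt_or_eq.mp hj with h | h
        · exact h
        · subst h; exact absurd hgt hm
      obtain ⟨j', h1, h2, hmax, h3⟩ := ih (by omega) ⟨j, hjm, hgt⟩
      refine ⟨j', by omega, h2, ?_, by rw [aFind, if_neg hm, h3]⟩
      intro k hk1 hk2
      rcases Nat.lt_succ_iff_lt_or_eq.mp hk2 with h | h
      · exact hmax k hk1 h
      · subst h; exact hm

theorem bRem_nil (y : Int) : bRem [] y = [] := rfl

theorem foldl_bRem_nil : ∀ (ys : List Int),
    ys.foldl (fun u y => bRem u y) [] = [] := by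
  intro ys
  induction ys with
  | nil => rfl
  | cons y ys ih => simpa [List.foldl_cons, bRem_nil] using ih

theorem foldl_bRem_skip : ∀ (ys : List Int) (v : Int) (u : List Int),
    (∀ y ∈ ys, ¬ (v < y)) →
    ys.foldl (fun u y => bRem u y) (v :: u) = v :: ys.foldl (fun u y => bRem u y) u := by
  intro ys
  induction ys with
  | nil => intro v u _; rfl
  | cons y ys ih =>
    intro v u h
    have hy : ¬ (v < y) := h y (by simp)
    have hstep : bRem (v :: u) y = v :: bRem u y := by rw [bRem, if_neg hy]
    simp only [List.foldl_cons, hstep]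
    exact ih v (bRem u y) (fun z hz => h z (by simp [hz]))

-- the dual greedy: folding the neighbour factor from the right computes
-- exactly A's unpaired list, on arbitrary factors
theorem dual_eq : ∀ (a b u0 : List Int), (aPairLoop a b u0).1 = u0 ++ bDual a b := by
  intro a
  induction a with
  | nil =>
    intro b u0
    show ((u0, b)).1 = u0 ++ bDual [] b
    rw [bDual, foldl_bRem_nil, List.append_nil]
  | cons v rest ih =>
    intro b u0
    by_cases hex : ∃ j, j < b.length ∧ v < b.getD j 0
    · obtain ⟨j, hj, hgt, hmax, hfind⟩ := aFind_some b v b.length le_rfl hex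
      rw [aPairLoop, hfind, ih (b.take j ++ b.drop (j + 1)) u0]
      have hd : ∀ y ∈ b.drop (j + 1), ¬ (v < y) := by
        intro y hy
        obtain ⟨k, hk, rfl⟩ := List.mem_iff_getElem.mp hy
        have hlen := List.length_drop (l := b) (i := j + 1)
        have hkl : j + 1 + k < b.length := by omega
        have hget : (b.drop (j + 1))[k] = b[j + 1 + k] := List.getElem_drop ..
        rw [hget]
        have := hmax (j + 1 + k) (by omega) (by omega)
        rwa [List.getD_eq_getElem b 0 hkl] at this
      have hdrev : ∀ y ∈ (b.drop (j + 1)).reverse, ¬ (v < y) :=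
        fun y hy => hd y (List.mem_reverse.mp hy)
      have hsplit : b = b.take j ++ b.getD j 0 :: b.drop (j + 1) := by
        conv_lhs => rw [← List.take_append_drop j b]
        congr 1
        rw [List.getD_eq_getElem b 0 (by omega)]
        exact (List.getElem_cons_drop (by omega)).symm
      have key : bDual (v :: rest) b = bDual rest (b.take j ++ b.drop (j + 1)) := by
        unfold bDual
        conv_lhs => rw [hsplit]
        rw [List.reverse_append, List.reverse_cons, List.foldl_append, List.foldl_append,
          foldl_bRem_skip _ v rest hdrev]
        have hrem : bRem
            (v :: ((b.drop (j + 1)).reverse.foldl (fun u y => bRem u y) rest))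
            (b.getD j 0)
            = (b.drop (j + 1)).reverse.foldl (fun u y => bRem u y) rest := by
          rw [bRem, if_pos hgt]
        simp only [List.foldl_cons, List.foldl_nil, hrem]
        rw [List.reverse_append, List.foldl_append]
      rw [key]
    · have hall : ∀ j, j < b.length → ¬ (v < b.getD j 0) := by
        intro j hj hlt; exact hex ⟨j, hj, hlt⟩
      have hnone := aFind_none b v b.length hall
      rw [aPairLoop, hnone, ih b (u0 ++ [v])]
      have hb : ∀ y ∈ b.reverse, ¬ (v < y) := by
        intro y hy
        obtain ⟨k, hk, rfl⟩ := List.mem_iff_getElem.mp (List.mem_reverse.mp hy)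
        have := hall k hk
        rwa [List.getD_eq_getElem b 0 hk] at this
      have hdd : bDual (v :: rest) b = v :: bDual rest b := by
        unfold bDual; exact foldl_bRem_skip b.reverse v rest hb
      rw [hdd]; simp

theorem yloop_congr (b s : List Int) (h : ∀ z : Int, z ∈ s ↔ z ∈ b) :
    ∀ (f : Nat) (y : Int), aYLoop b y f = bYLoop s y f := by
  intro f
  induction f with
  | zero => intro y; rfl
  | succ m ih =>
    intro y
    rw [aYLoop, bYLoop]
    by_cases hy : y ∈ b
    · rw [if_pos hy, if_pos ((h y).mpr hy), ih]
    · rw [if_neg hy, if_neg (fun hc => hy ((h y).mp hc))]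

theorem sorted_rev_eq (l : List Int) :
    PySem.List.sorted l (fun e => e) true = (PySem.List.sorted l (fun e => e) false).reverse := by
  apply List.Perm.eq_of_pairwise
    (le := fun a b : Int => b ≤ a)
    (fun a b _ _ h1 h2 => le_antisymm h2 h1)
    (PySem.List.sorted_pairwise_rev ..)
    (by rw [List.pairwise_reverse]; exact PySem.List.sorted_pairwise ..)
  exact (PySem.List.sorted_perm ..).trans ((List.reverse_perm _).trans (PySem.List.sorted_perm ..)).symm

theorem bStripLen_le (df : List (List Int)) : ∀ k, bStripLen df k ≤ k := by
  intro k
  induction k with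
  | zero => exact le_rfl
  | succ m ih =>
    rw [bStripLen]
    by_cases hc : df.getD m [] = []
    · rw [if_pos hc]; omega
    · rw [if_neg hc]

theorem bStripLen_append (l : List (List Int)) (e : List Int) :
    ∀ k, k ≤ l.length → bStripLen (l ++ [e]) k = bStripLen l k := by
  intro k
  induction k with
  | zero => intro _; rfl
  | succ m ih =>
    intro h
    have hg : (l ++ [e]).getD m [] = l.getD m [] := by
      simp [List.getD, List.getElem?_append_left (by omega : m < l.length)]
    rw [bStripLen, bStripLen, hg]
    by_cases hc : l.getD m [] = []
    · rw [if_pos hc, if_pos hc, ih (by omega)]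
    · rw [if_neg hc, if_neg hc]

theorem strip_eq : ∀ (df : List (List Int)), aStrip df = df.take (bStripLen df df.length) := by
  intro df
  induction df using List.reverseRecOn with
  | nil => rw [aStrip]; simp [bStripLen]
  | append_singleton l e ih =>
    by_cases he : e = ([] : List Int)
    · subst he
      have h1 : aStrip (l ++ [[]]) = aStrip l := by
        rw [aStrip, if_pos (by simp)]
        rw [List.dropLast_concat]
      have hlen : (l ++ [([] : List Int)]).length = l.length + 1 := by simp
      have hg : (l ++ [([] : List Int)]).getD l.length [] = [] := by
        simp [List.getD, List.getElem?_append_right le_rfl]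
      have h2 : bStripLen (l ++ [[]]) (l.length + 1) = bStripLen l l.length := by
        rw [bStripLen, if_pos hg]
        exact bStripLen_append l [] l.length le_rfl
      rw [h1, ih, hlen, h2]
      rw [List.take_append_of_le_length (bStripLen_le l l.length)]
    · have h1 : aStrip (l ++ [e]) = l ++ [e] := by
        rw [aStrip, if_neg]
        simp [he]
      have hlen : (l ++ [e]).length = l.length + 1 := by simp
      have hg : (l ++ [e]).getD l.length [] = e := by
        simp [List.getD, List.getElem?_append_right le_rfl]
      have h2 : bStripLen (l ++ [e]) (l.length + 1) = l.length + 1 := by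
        rw [bStripLen, hg, if_neg he]
      rw [h1, hlen, h2, ← hlen, List.take_length]

theorem chk_eq (df : List (List Int)) : aBoundedChk df = bBoundedChk df := by
  rw [Bool.eq_iff_iff]
  unfold aBoundedChk bBoundedChk
  simp only [List.all_eq_true, List.mem_range, PySem.List.mem_enumerate_iff]
  constructor
  · rintro h p ⟨k, hk, rfl⟩
    have := h k hk
    simpa [List.getElem?_eq_getElem hk] using this
  · intro h k hk
    have := h ((0 : Int) + (k : Int), df[k]) ⟨k, hk, rfl⟩
    simpa [List.getElem?_eq_getElem hk] using this

theorem loops_eq (fac : List (List Int)) (bounded : Bool) :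
    ∀ (fuel i : Nat), i + fuel = fac.length →
    aLoop bounded fac i fuel = bLoop bounded fac fac.length i fuel := by
  intro fuel
  induction fuel with
  | zero => intro i _; rfl
  | succ f ih =>
    intro i hif
    have hi : i < fac.length := by omega
    have hyc : ∀ (bb : List Int) (n : Nat) (y : Int),
        aYLoop bb y n = bYLoop (PySem.Set.ofList bb) y n :=
      fun bb n y => yloop_congr bb (PySem.Set.ofList bb)
        (fun z => PySem.Set.mem_ofList bb z) n y
    by_cases hlast : i + 1 < fac.length
    · rw [aLoop, bLoop]
      simp only [if_neg (by omega : ¬ i + 1 = fac.length), if_pos hlast]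
      have hAB : (aPairLoop (fac.getD i []) (fac.getD (i + 1) []) []).1
          = bDual (fac.getD i []) (fac.getD (i + 1) []) := by
        rw [dual_eq]; simp
      have hgset : ∀ (w : List Int), ((fac.set i w).getD (i + 1) []) = fac.getD (i + 1) [] := by
        intro w
        simp [List.getD, List.getElem?_set_ne (by omega : i ≠ i + 1)]
      have hsor : ∀ (y : Int), PySem.List.sorted (fac.getD (i + 1) [] ++ [y]) (fun e => e) true
          = bSortDesc (fac.getD (i + 1) [] ++ [y]) := fun y => by
        rw [sorted_rev_eq]; rfl
      have hrest := ih (i + 1) (by omega)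
      simp only [hAB, hgset, hyc, hsor, strip_eq, chk_eq, hrest]
    · have hn : i + 1 = fac.length := by omega
      have hf : f = 0 := by omega
      subst hf
      rw [aLoop, bLoop]
      simp only [if_pos hn, if_neg hlast]
      have hga : (fac ++ [([] : List Int)]).getD i [] = fac.getD i [] := by
        simp [List.getD, List.getElem?_append_left hi]
      have hgb : (fac ++ [([] : List Int)]).getD (i + 1) [] = [] := by
        rw [hn]; simp [List.getD, List.getElem?_append_right le_rfl]
      simp only [hga, hgb]
      have hAB : (aPairLoop (fac.getD i []) [] []).1 = bDual (fac.getD i []) [] := by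
        rw [dual_eq]; simp
      have hs1 : ∀ (w : List Int), (fac ++ [([] : List Int)]).set i w = fac.set i w ++ [[]] :=
        fun w => List.set_append_left i w hi
      have hgset2 : ∀ (w : List Int), ((fac.set i w ++ [([] : List Int)]).getD (i + 1) []) = [] := by
        intro w
        have hlen : (fac.set i w).length = i + 1 := by simp [hn]
        rw [← hlen]
        simp [List.getD, List.getElem?_append_right le_rfl]
      have hs2 : ∀ (w S : List Int), (fac.set i w ++ [([] : List Int)]).set (i + 1) S
          = fac.set i w ++ [S] := by
        intro w S
        have hlen : (fac.set i w).length = i + 1 := by simp [hn]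
        conv_lhs => rw [← hlen]
        rw [List.set_append_right _ _ le_rfl]
        simp
      have hsor : ∀ (y : Int), PySem.List.sorted (([] : List Int) ++ [y]) (fun e => e) true
          = bSortDesc (([] : List Int) ++ [y]) := fun y => by
        rw [sorted_rev_eq]; rfl
      simp only [hAB, hs1, hgset2, hs2, hyc, hsor, strip_eq, chk_eq,
        show aLoop bounded (fac ++ [[]]) (i + 1) 0 = [] from rfl,
        show bLoop bounded fac fac.length (i + 1) 0 = [] from rfl]

-- ===== VERDICT (by name: the statement is the Claim_ definition above) =====
theorem morse_schilling_f_spec : Claim_equal_morse_schilling_f := by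
  intro fac bounded _
  unfold Spec_morse_schilling_f morse_schilling_f morse_schilling_f_alt
  exact loops_eq fac bounded fac.length 0 (by omega)
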